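-- pv_equiv track=rewrite | github.com/agam-lang/benchmarks | suites/02_numerical_computation/comparisons/matrix_multiply.py | matrix_checksum
-- ===== SOURCE A (Python) =====
-- def matrix_checksum(size: int) -> int:
--     s = 0
--     for row in range(size):
--         for col in range(size):
--             cell = 0
--             for inner in range(size):
--                 cell += ((row * inner) + 3) * ((inner * col) + 5)
--             s += cell % 104729
--     return s
-- ===== SOURCE B (Python) =====
-- def matrix_checksum(size: int) -> int:
--     s1 = size * (size - 1) // 2
--     s2 = (size - 1) * size * (2 * size - 1) // 6
--     s = 0
--     for row in range(size):
--         for col in range(size):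
--             cell = row * col * s2 + (5 * row + 3 * col) * s1 + 15 * size
--             s += cell % 104729
--     return s
-- ===== Notes on version B (the rewrite author's own statement) =====
-- stated objective: faster
-- what changed: Replaced the O(size^3) triple loop by computing each cell's inner sum in closed form from the precomputed sums of inner and inner^2 (Faulhaber formulas), keeping only the O(size^2) double loop over cells.
import Mathlib
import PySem

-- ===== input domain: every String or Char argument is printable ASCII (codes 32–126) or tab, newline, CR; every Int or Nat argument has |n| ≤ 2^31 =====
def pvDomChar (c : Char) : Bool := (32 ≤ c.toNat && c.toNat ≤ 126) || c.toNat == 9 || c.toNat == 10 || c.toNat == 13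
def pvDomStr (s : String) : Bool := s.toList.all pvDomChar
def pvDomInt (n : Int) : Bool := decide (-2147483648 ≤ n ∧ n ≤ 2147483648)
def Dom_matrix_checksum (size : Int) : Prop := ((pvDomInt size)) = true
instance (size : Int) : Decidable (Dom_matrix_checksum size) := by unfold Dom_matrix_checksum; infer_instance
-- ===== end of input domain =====

-- B replaces the O(size^3) triple loop by a closed-form per-cell value from precomputed
-- sums of inner and inner^2, an O(size^2) double loop (objective: faster).

-- ===== PORT A =====
def matrix_checksum (size : Int) : Int :=
  (PySem.List.pyRange 0 size 1).foldl (fun s row =>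
    (PySem.List.pyRange 0 size 1).foldl (fun s col =>
      s + PySem.Int.mod
        ((PySem.List.pyRange 0 size 1).foldl
          (fun cell inner => cell + ((row * inner) + 3) * ((inner * col) + 5)) 0)
        104729) s) 0

-- ===== PORT B =====
def matrix_checksum_alt (size : Int) : Int :=
  let s1 := PySem.Int.floordiv (size * (size - 1)) 2
  let s2 := PySem.Int.floordiv ((size - 1) * size * (2 * size - 1)) 6
  (PySem.List.pyRange 0 size 1).foldl (fun s row =>
    (PySem.List.pyRange 0 size 1).foldl (fun s col =>
      s + PySem.Int.mod
        (row * col * s2 + (5 * row + 3 * col) * s1 + 15 * size)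
        104729) s) 0

-- ===== PRECONDITION & SPEC =====
def Spec_matrix_checksum (size : Int) (out : Int) : Prop := out = matrix_checksum_alt size
instance (size : Int) (out : Int) : Decidable (Spec_matrix_checksum size out) := by unfold Spec_matrix_checksum; infer_instance

-- ===== CLAIM (what is proved, stated in full; the proofs are below) =====
def Claim_equal_matrix_checksum : Prop := ∀ (size : Int), Dom_matrix_checksum size → Spec_matrix_checksum size (matrix_checksum size)

-- ===== LEMMAS AND PROOFS =====

/-- Σ_{i<n} i as an Int. -/
def pvSumI : Nat → Int
  | 0 => 0
  | n + 1 => pvSumI n + n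

/-- Σ_{i<n} i² as an Int. -/
def pvSumI2 : Nat → Int
  | 0 => 0
  | n + 1 => pvSumI2 n + (n : Int) * n

theorem pvTwo_sumI (n : Nat) : 2 * pvSumI n = (n : Int) * ((n : Int) - 1) := by
  induction n with
  | zero => simp [pvSumI]
  | succ n ih =>
    simp only [pvSumI]
    push_cast
    linear_combination ih

theorem pvSix_sumI2 (n : Nat) :
    6 * pvSumI2 n = ((n : Int) - 1) * (n : Int) * (2 * (n : Int) - 1) := by
  induction n with
  | zero => simp [pvSumI2]
  | succ n ih =>
    simp only [pvSumI2]
    push_cast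
    linear_combination ih

theorem pvS1_eq (n : Nat) :
    PySem.Int.floordiv ((n : Int) * ((n : Int) - 1)) 2 = pvSumI n := by
  rw [PySem.Int.floordiv_eq_iff_of_pos (by norm_num)]
  constructor <;> linarith [pvTwo_sumI n]

theorem pvS2_eq (n : Nat) :
    PySem.Int.floordiv (((n : Int) - 1) * (n : Int) * (2 * (n : Int) - 1)) 6 = pvSumI2 n := by
  rw [PySem.Int.floordiv_eq_iff_of_pos (by norm_num)]
  constructor <;> linarith [pvSix_sumI2 n]

/-- A's inner loop in closed form. -/
theorem pvInner_eq (row col : Int) (n : Nat) :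
    (PySem.List.pyRange 0 (n : Int) 1).foldl
      (fun cell inner => cell + ((row * inner) + 3) * ((inner * col) + 5)) 0
    = row * col * pvSumI2 n + (5 * row + 3 * col) * pvSumI n + 15 * n := by
  have key : ∀ (m : Nat) (init : Int),
      (PySem.List.pyRange 0 (m : Int) 1).foldl
        (fun cell inner => cell + ((row * inner) + 3) * ((inner * col) + 5)) init
      = init + row * col * pvSumI2 m + (5 * row + 3 * col) * pvSumI m + 15 * m := by
    intro m
    induction m with
    | zero => intro init; simp [PySem.List.pyRange_one_eq_nil (by norm_num : (0:Int) ≤ 0), pvSumI, pvSumI2]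
    | succ m ih =>
      intro init
      have hcast : ((m + 1 : Nat) : Int) = (m : Int) + 1 := by push_cast; ring
      rw [hcast, PySem.List.pyRange_one_succ_right (by positivity), List.foldl_append]
      simp only [List.foldl, ih, pvSumI, pvSumI2]
      ring
  have := key n 0
  rw [this]; ring
theorem pvMain (n : Nat) : matrix_checksum (n : Int) = matrix_checksum_alt (n : Int) := by
  simp only [matrix_checksum, matrix_checksum_alt]
  apply PySem.List.foldl_congr_mem
  intro s row _
  apply PySem.List.foldl_congr_mem
  intro s' col _
  congr 1
  rw [pvInner_eq, pvS1_eq, pvS2_eq]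

-- ===== VERDICT (by name: the statement is the Claim_ definition above) =====
theorem matrix_checksum_spec : Claim_equal_matrix_checksum := by
  intro size _
  unfold Spec_matrix_checksum
  by_cases h : 0 ≤ size
  · obtain ⟨n, rfl⟩ := Int.eq_ofNat_of_zero_le h
    exact pvMain n
  · simp [matrix_checksum, matrix_checksum_alt,
      PySem.List.pyRange_one_eq_nil (by omega : size ≤ 0)]
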